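-- pv_equiv track=rewrite | github.com/jagabi/__kakao_codingtest__ | 2018_KAKAO_BLIND_RECRUITMENT/프렌즈4블록.py | setting
-- ===== SOURCE A (Python) =====
-- def setting(arr):
--     for i in sorted(list(range(len(arr))), reverse=True):
--         for j in sorted(list(range(len(arr[0]))), reverse=True):
--             if arr[i][j] == 0:
--                 for k in sorted(list(range(i)), reverse=True):
--                     if arr[k][j] != 0:
--                         arr[i][j] = arr[k][j]
--                         arr[k][j] = 0
--                         break
--     return arr
-- ===== SOURCE B (Python) =====
-- def setting(arr):
--     if not arr:
--         return arr
--     h = len(arr)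
--     for j in range(len(arr[0])):
--         col = [arr[i][j] for i in range(h) if arr[i][j] != 0]
--         col = [0] * (h - len(col)) + col
--         for i in range(h):
--             arr[i][j] = col[i]
--     return arr
-- ===== Notes on version B (the rewrite author's own statement) =====
-- stated objective: alternative
-- what changed: Replaces A's per-cell upward scan for the nearest nonzero (an inner search repeated for every zero cell, O(rows) each in the worst case) by a per-column pack: read each column once, keep its nonzeros in order, pad zeros on top, write it back.
import Mathlib
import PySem

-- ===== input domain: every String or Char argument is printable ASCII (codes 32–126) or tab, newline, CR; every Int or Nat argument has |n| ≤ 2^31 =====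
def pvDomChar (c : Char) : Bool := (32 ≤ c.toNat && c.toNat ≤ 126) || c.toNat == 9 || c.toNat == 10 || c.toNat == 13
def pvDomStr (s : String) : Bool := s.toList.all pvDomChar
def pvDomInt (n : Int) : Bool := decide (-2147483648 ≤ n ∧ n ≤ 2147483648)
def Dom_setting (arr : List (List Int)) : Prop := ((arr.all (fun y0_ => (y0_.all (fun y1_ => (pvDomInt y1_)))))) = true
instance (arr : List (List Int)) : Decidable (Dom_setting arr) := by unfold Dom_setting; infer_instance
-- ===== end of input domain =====

-- ===== PORT A =====
-- B packs each column's nonzeros to the bottom in one pass instead of A's per-cell upward scan (a different, per-column algorithm).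
-- Both ports index via getD-based helpers; Pre_setting guarantees every Python access is in range, where these agree exactly.
-- Note: the Python functions mutate `arr` in place and return it; the equivalence proved here is about the return value.

-- cell read arr[i][j] / write arr[i][j] = v (total; in range under Pre_setting)
def g2 (g : List (List Int)) (i j : Nat) : Int := (g.getD i []).getD j 0
def s2 (g : List (List Int)) (i j : Nat) (v : Int) : List (List Int) :=
  g.modify i (fun r => r.set j v)

-- 'for k in sorted(list(range(i)), reverse=True): if arr[k][j] != 0: …; break'
def aFind (g : List (List Int)) (i j : Nat) : List Nat → List (List Int)
  | [] => g
  | k :: ks => if g2 g k j ≠ 0 then s2 (s2 g i j (g2 g k j)) k j 0 else aFind g i j ks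

-- body of the inner j-loop
def aStep (g : List (List Int)) (i j : Nat) : List (List Int) :=
  if g2 g i j = 0 then aFind g i j (List.range i).reverse else g

-- one outer iteration: 'for j in sorted(list(range(len(arr[0]))), reverse=True)'
def aRow (g : List (List Int)) (i : Nat) : List (List Int) :=
  ((List.range (g.headD []).length).reverse).foldl (fun g' j => aStep g' i j) g

def setting (arr : List (List Int)) : List (List Int) :=
  ((List.range arr.length).reverse).foldl aRow arr

-- ===== PORT B =====
-- 'for i in range(h): arr[i][j] = col[i]'
def bWrite (g : List (List Int)) (j : Nat) (c2 : List Int) (h : Nat) : List (List Int) :=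
  (List.range h).foldl (fun g' i => s2 g' i j (c2.getD i 0)) g

-- body of B's j-loop: read the column's nonzeros, pad zeros on top, write back
def bOp (h : Nat) (g : List (List Int)) (j : Nat) : List (List Int) :=
  let c := (List.range h).filterMap (fun i => if g2 g i j ≠ 0 then some (g2 g i j) else none)
  let c2 := List.replicate (h - c.length) 0 ++ c
  bWrite g j c2 h

def setting_alt (arr : List (List Int)) : List (List Int) :=
  if arr.isEmpty then arr
  else (List.range (arr.headD []).length).foldl (bOp arr.length) arr

-- ===== PRECONDITION & SPEC =====
-- Pre_ excludes exactly the ragged inputs where some row is shorter than row 0, on which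
-- Python A raises IndexError (arr[i][j] for j < len(arr[0])); rows longer than row 0 are kept.
def Pre_setting (arr : List (List Int)) : Prop :=
  ∀ r ∈ arr, (arr.headD []).length ≤ r.length
instance (arr : List (List Int)) : Decidable (Pre_setting arr) := by
  unfold Pre_setting; infer_instance
def pvWitness_setting : List (List Int) := [[1, 0], [0, 2]]
def Spec_setting (arr : List (List Int)) (out : List (List Int)) : Prop := out = setting_alt arr
instance (arr : List (List Int)) (out : List (List Int)) : Decidable (Spec_setting arr out) := by unfold Spec_setting; infer_instance

-- ===== CLAIM (what is proved, stated in full; the proofs are below) =====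
def Claim_equal_setting : Prop := ∀ (arr : List (List Int)), Dom_setting arr → Pre_setting arr → Spec_setting arr (setting arr)

-- ===== LEMMAS AND PROOFS =====

-- column / shape abstraction
def colOf (g : List (List Int)) (j : Nat) : List Int := g.map (fun r => r.getD j 0)
def lens (g : List (List Int)) : List Nat := g.map List.length
def RowLen (w : Nat) (g : List (List Int)) : Prop := ∀ r ∈ g, w ≤ r.length
def nzL (c : List Int) : List Int := c.filter (fun x => decide (x ≠ 0))
def colB (c : List Int) : List Int := List.replicate (c.length - (nzL c).length) 0 ++ nzL c

-- per-column mirrors of A's steps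
def cFind (c : List Int) (i : Nat) : List Nat → List Int
  | [] => c
  | k :: ks => if c.getD k 0 ≠ 0 then (c.set i (c.getD k 0)).set k 0 else cFind c i ks
def cStep (c : List Int) (i : Nat) : List Int :=
  if c.getD i 0 = 0 then cFind c i (List.range i).reverse else c

theorem length_colOf (g : List (List Int)) (j : Nat) : (colOf g j).length = g.length := by
  simp [colOf]

theorem length_lens (g : List (List Int)) : (lens g).length = g.length := by simp [lens]

theorem g2_eq (g : List (List Int)) (i j : Nat) : g2 g i j = (colOf g j).getD i 0 := by
  induction g generalizing i with
  | nil => simp [g2, colOf]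
  | cons r t ih =>
    cases i with
    | zero => simp [g2, colOf]
    | succ n => simpa [g2, colOf] using ih n

theorem lens_s2 (g : List (List Int)) (i j : Nat) (v : Int) : lens (s2 g i j v) = lens g := by
  apply List.ext_getElem?
  intro t
  simp only [lens, s2, List.getElem?_map, List.getElem?_modify]
  cases g[t]? with
  | none => rfl
  | some r =>
    simp only [Option.map_some]
    split <;> simp

theorem length_s2 (g : List (List Int)) (i j : Nat) (v : Int) :
    (s2 g i j v).length = g.length := by simp [s2]

theorem colOf_s2_ne (g : List (List Int)) (i j j' : Nat) (v : Int) (h : j' ≠ j) :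
    colOf (s2 g i j v) j' = colOf g j' := by
  apply List.ext_getElem?
  intro t
  simp only [colOf, s2, List.getElem?_map, List.getElem?_modify]
  cases g[t]? with
  | none => rfl
  | some r =>
    simp only [Option.map_some]
    split
    · simp [List.getD_eq_getElem?_getD, List.getElem?_set, h.symm]
    · rfl

theorem colOf_s2_same (g : List (List Int)) (i j : Nat) (v : Int)
    (hi : i < g.length) (hj : j < (g.getD i []).length) :
    colOf (s2 g i j v) j = (colOf g j).set i v := by
  apply List.ext_getElem?
  intro t
  simp only [colOf, s2, List.getElem?_map, List.getElem?_modify, List.getElem?_set,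
    List.length_map]
  by_cases hit : i = t
  · subst hit
    have hg : g[i]? = some g[i] := List.getElem?_eq_getElem hi
    have hj' : j < g[i].length := by
      rw [List.getD_eq_getElem?_getD, hg] at hj
      simpa using hj
    simp [hg, hi, List.getD_eq_getElem?_getD, List.getElem?_set, hj']
  · simp [hit]

theorem rowLen_of_lens {w : Nat} {g1 g2 : List (List Int)}
    (h : lens g1 = lens g2) (h2 : RowLen w g2) : RowLen w g1 := by
  intro r hr
  have : r.length ∈ lens g2 := by
    rw [← h]
    exact List.mem_map_of_mem hr
  obtain ⟨r2, hr2, he⟩ := List.mem_map.mp this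
  rw [← he]
  exact h2 r2 hr2

theorem wOf_eq (g : List (List Int)) : (g.headD []).length = (lens g).headD 0 := by
  cases g <;> simp [lens]

theorem length_of_lens {g1 g2 : List (List Int)} (h : lens g1 = lens g2) :
    g1.length = g2.length := by
  rw [← length_lens g1, ← length_lens g2, h]

theorem row_long {w : Nat} {g : List (List Int)} {j : Nat} (hw : RowLen w g) (hj : j < w)
    (t : Nat) (ht : t < g.length) : j < (g.getD t []).length := by
  have hmem : g.getD t [] ∈ g := by
    rw [List.getD_eq_getElem?_getD, List.getElem?_eq_getElem ht]
    exact List.getElem_mem ht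
  exact Nat.lt_of_lt_of_le hj (hw _ hmem)

-- ---- simulation of A on a single column ----

theorem aFind_sim (w : Nat) (kl : List Nat) (g : List (List Int)) (i j : Nat)
    (hw : RowLen w g) (hj : j < w) (hi : i < g.length) (hk : ∀ k ∈ kl, k < g.length) :
    colOf (aFind g i j kl) j = cFind (colOf g j) i kl
    ∧ (∀ j', j' ≠ j → colOf (aFind g i j kl) j' = colOf g j')
    ∧ lens (aFind g i j kl) = lens g := by
  induction kl with
  | nil => simp [aFind, cFind]
  | cons k ks ih =>
    have hkg : k < g.length := hk k (by simp)
    have hkrest : ∀ k' ∈ ks, k' < g.length := fun k' h' => hk k' (by simp [h'])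
    simp only [aFind, cFind, g2_eq]
    split
    · set v := (colOf g j).getD k 0 with hv
      have h1 : colOf (s2 g i j v) j = (colOf g j).set i v :=
        colOf_s2_same g i j v hi (row_long hw hj i hi)
      have hl1 : lens (s2 g i j v) = lens g := lens_s2 g i j v
      have h2 : colOf (s2 (s2 g i j v) k j 0) j = ((colOf g j).set i v).set k 0 := by
        rw [colOf_s2_same _ k j 0 (by rw [length_s2]; exact hkg)
          (by
            have hw' : RowLen w (s2 g i j v) := rowLen_of_lens hl1 hw
            exact row_long hw' hj k (by rw [length_s2]; exact hkg)), h1]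
      refine ⟨h2, ?_, ?_⟩
      · intro j' hj'
        rw [colOf_s2_ne _ k j j' 0 hj', colOf_s2_ne _ i j j' v hj']
      · rw [lens_s2, lens_s2]
    · exact ih hkrest

theorem aStep_sim (w : Nat) (g : List (List Int)) (i j : Nat)
    (hw : RowLen w g) (hj : j < w) (hi : i < g.length) :
    colOf (aStep g i j) j = cStep (colOf g j) i
    ∧ (∀ j', j' ≠ j → colOf (aStep g i j) j' = colOf g j')
    ∧ lens (aStep g i j) = lens g := by
  unfold aStep cStep
  rw [g2_eq]
  split
  · exact aFind_sim w _ g i j hw hj hi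
      (fun k hkk => Nat.lt_trans (by simpa [List.mem_reverse, List.mem_range] using hkk) hi)
  · simp

theorem aRowFold_sim (w i : Nat) (jl : List Nat) :
    ∀ (g : List (List Int)), jl.Nodup → (∀ j ∈ jl, j < w) → RowLen w g → i < g.length →
    (∀ j', colOf (jl.foldl (fun g' j => aStep g' i j) g) j' =
        if j' ∈ jl then cStep (colOf g j') i else colOf g j')
    ∧ lens (jl.foldl (fun g' j => aStep g' i j) g) = lens g := by
  induction jl with
  | nil => intro g _ _ _ _; simp
  | cons j0 rest ih =>
    intro g hnd hlt hw hi
    simp only [List.foldl_cons]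
    have h0 := aStep_sim w g i j0 hw (hlt j0 (by simp)) hi
    have hlens1 : lens (aStep g i j0) = lens g := h0.2.2
    have hw1 : RowLen w (aStep g i j0) := rowLen_of_lens hlens1 hw
    have hi1 : i < (aStep g i j0).length := by rw [length_of_lens hlens1]; exact hi
    have ihh := ih (aStep g i j0) (List.nodup_cons.mp hnd).2
      (fun j hj => hlt j (by simp [hj])) hw1 hi1
    refine ⟨?_, ihh.2.trans hlens1⟩
    intro j'
    rw [ihh.1 j']
    by_cases hmem : j' ∈ rest
    · have hne : j' ≠ j0 := fun h => (List.nodup_cons.mp hnd).1 (h ▸ hmem)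
      simp [hmem, h0.2.1 j' hne]
    · by_cases he : j' = j0
      · subst he; simp [hmem, h0.1]
      · simp [hmem, he, h0.2.1 j' he]

theorem outer_sim (w : Nat) (il : List Nat) :
    ∀ (g : List (List Int)), (∀ i ∈ il, i < g.length) → RowLen w g →
    (g.headD []).length = w →
    (∀ j', colOf (il.foldl aRow g) j' =
        if j' < w then il.foldl cStep (colOf g j') else colOf g j')
    ∧ lens (il.foldl aRow g) = lens g := by
  induction il with
  | nil => intro g _ _ _; simp
  | cons i0 rest ih =>
    intro g hlt hw hwg
    simp only [List.foldl_cons]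
    have hrow : aRow g i0 = ((List.range w).reverse).foldl (fun g' j => aStep g' i0 j) g := by
      unfold aRow
      rw [hwg]
    have h0 := aRowFold_sim w i0 ((List.range w).reverse) g
      (List.nodup_reverse.mpr List.nodup_range) (by intro j hj; simpa [List.mem_reverse, List.mem_range] using hj)
      hw (hlt i0 (by simp))
    rw [hrow]
    have hlens1 := h0.2
    have hw1 : RowLen w (((List.range w).reverse).foldl (fun g' j => aStep g' i0 j) g) :=
      rowLen_of_lens hlens1 hw
    have hwg1 : ((((List.range w).reverse).foldl (fun g' j => aStep g' i0 j) g).headD []).length = w := by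
      rw [wOf_eq, hlens1, ← wOf_eq, hwg]
    have ihh := ih _ (fun i hi => by rw [length_of_lens hlens1]; exact hlt i (by simp [hi])) hw1 hwg1
    refine ⟨?_, ihh.2.trans hlens1⟩
    intro j'
    rw [ihh.1 j']
    by_cases hjw : j' < w
    · rw [if_pos hjw, if_pos hjw, h0.1 j', if_pos (by simpa [List.mem_reverse, List.mem_range] using hjw)]
    · rw [if_neg hjw, if_neg hjw, h0.1 j', if_neg (by simpa [List.mem_reverse, List.mem_range] using hjw)]

-- ---- simulation of B on a single column ----

theorem readCol (c : List Int) :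
    (List.range c.length).filterMap
      (fun i => if c.getD i 0 ≠ 0 then some (c.getD i 0) else none) = nzL c := by
  induction c with
  | nil => simp [nzL]
  | cons x t ih =>
    rw [List.length_cons, List.range_succ_eq_map]
    rw [List.filterMap_cons, List.filterMap_map]
    have hc : (fun i => if (x :: t).getD (Nat.succ i) 0 ≠ 0
        then some ((x :: t).getD (Nat.succ i) 0) else none)
        = (fun i => if t.getD i 0 ≠ 0 then some (t.getD i 0) else none) := by
      funext i; simp [List.getD_cons_succ]
    have hcomp : ((fun i => if (x :: t).getD i 0 ≠ 0 then some ((x :: t).getD i 0) else none) ∘ Nat.succ)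
        = (fun i => if t.getD i 0 ≠ 0 then some (t.getD i 0) else none) := by
      funext i; simp [Function.comp, List.getD_cons_succ]
    rw [hcomp, ih]
    by_cases hx : x = 0
    · simp [hx, nzL, List.filter_cons]
    · simp [hx, nzL, List.filter_cons]

theorem setFold_spec (u c2 : List Int) (m : Nat) :
    ((List.range m).foldl (fun u' i => u'.set i (c2.getD i 0)) u).length = u.length
    ∧ ∀ t, ((List.range m).foldl (fun u' i => u'.set i (c2.getD i 0)) u)[t]? =
        if t < m ∧ t < u.length then some (c2.getD t 0) else (u[t]?) := by
  induction m with
  | zero => simp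
  | succ m ih =>
    rw [List.range_succ, List.foldl_append, List.foldl_cons, List.foldl_nil]
    refine ⟨by rw [List.length_set]; exact ih.1, ?_⟩
    intro t
    rw [List.getElem?_set, ih.1]
    by_cases hmt : m = t
    · subst hmt
      by_cases hml : m < u.length
      · simp [hml]
      · have hnone : u[m]? = none := List.getElem?_eq_none_iff.mpr (by omega)
        simp [hml, ih.2 m, hnone]
    · rw [if_neg hmt, ih.2 t]
      by_cases h1 : t < m ∧ t < u.length
      · rw [if_pos h1, if_pos ⟨by omega, h1.2⟩]
      · rw [if_neg h1, if_neg (by omega)]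

theorem setAll (u c2 : List Int) (h : c2.length = u.length) :
    (List.range u.length).foldl (fun u' i => u'.set i (c2.getD i 0)) u = c2 := by
  apply List.ext_getElem?
  intro t
  rw [(setFold_spec u c2 u.length).2 t]
  by_cases ht : t < u.length
  · rw [if_pos ⟨ht, ht⟩, List.getD_eq_getElem?_getD,
      List.getElem?_eq_getElem (by omega : t < c2.length)]
    rfl
  · rw [if_neg (by omega), List.getElem?_eq_none_iff.mpr (by omega),
      List.getElem?_eq_none_iff.mpr (by omega)]

theorem bWrite_fold_sim (w : Nat) (g : List (List Int)) (j : Nat) (c2 : List Int)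
    (hw : RowLen w g) (hj : j < w) (m : Nat) (hm : m ≤ g.length) :
    colOf ((List.range m).foldl (fun g' i => s2 g' i j (c2.getD i 0)) g) j
      = (List.range m).foldl (fun c i => c.set i (c2.getD i 0)) (colOf g j)
    ∧ (∀ j', j' ≠ j → colOf ((List.range m).foldl (fun g' i => s2 g' i j (c2.getD i 0)) g) j'
        = colOf g j')
    ∧ lens ((List.range m).foldl (fun g' i => s2 g' i j (c2.getD i 0)) g) = lens g := by
  induction m with
  | zero => simp
  | succ m ih =>
    have ihh := ih (by omega)
    rw [List.range_succ]
    simp only [List.foldl_append, List.foldl_cons, List.foldl_nil]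
    have hlm : ((List.range m).foldl (fun g' i => s2 g' i j (c2.getD i 0)) g).length = g.length :=
      length_of_lens ihh.2.2
    have hwm : RowLen w ((List.range m).foldl (fun g' i => s2 g' i j (c2.getD i 0)) g) :=
      rowLen_of_lens ihh.2.2 hw
    refine ⟨?_, ?_, ?_⟩
    · rw [colOf_s2_same _ m j _ (by omega) (row_long hwm hj m (by omega)), ihh.1]
    · intro j' hj'
      rw [colOf_s2_ne _ m j j' _ hj', ihh.2.1 j' hj']
    · rw [lens_s2, ihh.2.2]

theorem bOp_sim (w : Nat) (g : List (List Int)) (j : Nat) (hw : RowLen w g) (hj : j < w) :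
    colOf (bOp g.length g j) j = colB (colOf g j)
    ∧ (∀ j', j' ≠ j → colOf (bOp g.length g j) j' = colOf g j')
    ∧ lens (bOp g.length g j) = lens g := by
  have hread : (List.range g.length).filterMap
      (fun i => if g2 g i j ≠ 0 then some (g2 g i j) else none) = nzL (colOf g j) := by
    have : (fun i => if g2 g i j ≠ 0 then some (g2 g i j) else none)
        = (fun i => if (colOf g j).getD i 0 ≠ 0 then some ((colOf g j).getD i 0) else none) := by
      funext i; rw [g2_eq]
    rw [this, ← length_colOf g j, readCol]
  have hc2len : (List.replicate (g.length - (nzL (colOf g j)).length) 0 ++ nzL (colOf g j)).length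
      = g.length := by
    have h1 : (nzL (colOf g j)).length ≤ g.length := by
      rw [← length_colOf g j]; exact List.length_filter_le _ _
    simp [List.length_replicate]
    omega
  unfold bOp bWrite
  rw [hread]
  have hb := bWrite_fold_sim w g j (List.replicate (g.length - (nzL (colOf g j)).length) 0
      ++ nzL (colOf g j)) hw hj g.length (le_refl _)
  refine ⟨?_, hb.2.1, hb.2.2⟩
  rw [hb.1]
  have := setAll (colOf g j) (List.replicate (g.length - (nzL (colOf g j)).length) 0
      ++ nzL (colOf g j)) (by rw [hc2len, length_colOf])
  rw [length_colOf] at this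
  rw [this]
  unfold colB
  rw [length_colOf]

theorem bFold_sim (w h0 : Nat) (jl : List Nat) :
    ∀ (g : List (List Int)), jl.Nodup → (∀ j ∈ jl, j < w) → RowLen w g → g.length = h0 →
    (∀ j', colOf (jl.foldl (bOp h0) g) j' =
        if j' ∈ jl then colB (colOf g j') else colOf g j')
    ∧ lens (jl.foldl (bOp h0) g) = lens g := by
  induction jl with
  | nil => intro g _ _ _ _; simp
  | cons j0 rest ih =>
    intro g hnd hlt hw hg
    simp only [List.foldl_cons]
    have hop : colOf (bOp h0 g j0) j0 = colB (colOf g j0)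
        ∧ (∀ j', j' ≠ j0 → colOf (bOp h0 g j0) j' = colOf g j')
        ∧ lens (bOp h0 g j0) = lens g := by
      rw [← hg]
      exact bOp_sim w g j0 hw (hlt j0 (by simp))
    have hlens1 : lens (bOp h0 g j0) = lens g := hop.2.2
    have ihh := ih (bOp h0 g j0) (List.nodup_cons.mp hnd).2 (fun j hj => hlt j (by simp [hj]))
      (rowLen_of_lens hlens1 hw) (by rw [length_of_lens hlens1]; exact hg)
    refine ⟨?_, ihh.2.trans hlens1⟩
    intro j'
    rw [ihh.1 j']
    by_cases hmem : j' ∈ rest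
    · have hne : j' ≠ j0 := fun h => (List.nodup_cons.mp hnd).1 (h ▸ hmem)
      simp [hmem, hop.2.1 j' hne]
    · by_cases he : j' = j0
      · subst he; simp [hmem, hop.1]
      · simp [hmem, he, hop.2.1 j' he]

-- ---- grids with equal shapes and equal columns are equal ----

theorem grid_ext : ∀ (g1 g2 : List (List Int)), lens g1 = lens g2 →
    (∀ j, colOf g1 j = colOf g2 j) → g1 = g2 := by
  intro g1
  induction g1 with
  | nil =>
    intro g2 h _
    cases g2 with
    | nil => rfl
    | cons r t => simp [lens] at h
  | cons r t ih =>
    intro g2 h hc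
    cases g2 with
    | nil => simp [lens] at h
    | cons r2 t2 =>
      simp only [lens, List.map_cons, List.cons.injEq] at h
      have hr : r = r2 := by
        apply List.ext_getElem h.1
        intro j h1 h2
        have hcc := hc j
        simp only [colOf, List.map_cons, List.cons.injEq] at hcc
        have := hcc.1
        rw [List.getD_eq_getElem?_getD, List.getD_eq_getElem?_getD,
          List.getElem?_eq_getElem h1, List.getElem?_eq_getElem h2] at this
        simpa using this
      have ht : t = t2 := by
        apply ih t2 h.2
        intro j
        have hcc := hc j
        simp only [colOf, List.map_cons, List.cons.injEq] at hcc
        exact hcc.2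
      rw [hr, ht]

-- ---- the core per-column lemma: A's bottom-up pull steps produce B's packed column ----

theorem length_nzL_le (c : List Int) : (nzL c).length ≤ c.length := List.length_filter_le _ _

theorem length_colB (c : List Int) : (colB c).length = c.length := by
  have := length_nzL_le c
  simp [colB]
  omega

theorem nzL_replicate (n : Nat) : nzL (List.replicate n (0 : Int)) = [] := by
  apply List.filter_eq_nil_iff.mpr
  intro a ha
  simp [List.eq_of_mem_replicate ha]

theorem nzL_cons (x : Int) (t : List Int) :
    nzL (x :: t) = if x = 0 then nzL t else x :: nzL t := by
  by_cases hx : x = 0 <;> simp [nzL, List.filter_cons, hx]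

theorem nzL_append (a b : List Int) : nzL (a ++ b) = nzL a ++ nzL b :=
  List.filter_append a b

theorem nzL_drop_nzL (c : List Int) (d : Nat) : nzL ((nzL c).drop d) = (nzL c).drop d :=
  List.filter_eq_self.mpr (fun a ha => (List.mem_filter.mp (List.mem_of_mem_drop ha)).2)

theorem rev_range_succ (m : Nat) : (List.range (m + 1)).reverse = m :: (List.range m).reverse := by
  simp [List.range_succ]

theorem cFind_none (c : List Int) (i : Nat) :
    ∀ m, (∀ l, l < m → c.getD l 0 = 0) → cFind c i (List.range m).reverse = c := by
  intro m
  induction m with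
  | zero => intro _; simp [cFind]
  | succ m ih =>
    intro h
    rw [rev_range_succ]
    simp only [cFind]
    rw [if_neg (not_not_intro (h m (by omega)))]
    exact ih (fun l hl => h l (by omega))

theorem cFind_some (c : List Int) (i : Nat) :
    ∀ m k, k < m → c.getD k 0 ≠ 0 → (∀ l, k < l → l < m → c.getD l 0 = 0) →
    cFind c i (List.range m).reverse = (c.set i (c.getD k 0)).set k 0 := by
  intro m
  induction m with
  | zero => intro k hk; omega
  | succ m ih =>
    intro k hk hnz hz
    rw [rev_range_succ]
    simp only [cFind]
    by_cases he : k = m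
    · subst he
      rw [if_pos hnz]
    · have hkm : k < m := by omega
      rw [if_neg (not_not_intro (hz m (by omega) (by omega)))]
      exact ih k hkm hnz (fun l h1 h2 => hz l h1 (by omega))

theorem exists_largest (c : List Int) :
    ∀ m, (∃ l, l < m ∧ c.getD l 0 ≠ 0) →
    ∃ k, k < m ∧ c.getD k 0 ≠ 0 ∧ ∀ l, k < l → l < m → c.getD l 0 = 0 := by
  intro m
  induction m with
  | zero => rintro ⟨l, hl, _⟩; omega
  | succ m ih =>
    rintro ⟨l, hl, hnz⟩
    by_cases hm : c.getD m 0 = 0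
    · have hlm : l < m := by
        rcases Nat.lt_succ_iff_lt_or_eq.mp hl with h | h
        · exact h
        · subst h; exact absurd hm hnz
      obtain ⟨k, h1, h2, h3⟩ := ih ⟨l, hlm, hnz⟩
      refine ⟨k, by omega, h2, ?_⟩
      intro l' ha hb
      by_cases hlm' : l' = m
      · subst hlm'; exact hm
      · exact h3 l' ha (by omega)
    · exact ⟨m, by omega, hm, fun l' ha hb => by omega⟩

-- 0s below position m: setting position m to x prepends x's filter contribution
theorem nzL_set_zeros (t : List Int) :
    ∀ m, m < t.length → (∀ l, l < m → t.getD l 0 = 0) → t.getD m 0 = 0 →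
    ∀ x, nzL (t.set m x) = nzL [x] ++ nzL t := by
  induction t with
  | nil => intro m hm; simp at hm
  | cons y t' ih =>
    intro m hm hz h0 x
    cases m with
    | zero =>
      have hy : y = 0 := by simpa using h0
      subst hy
      rw [List.set_cons_zero, nzL_cons x, nzL_cons (0 : Int), if_pos rfl]
      by_cases hx : x = 0 <;> simp [hx, nzL]
    | succ m =>
      have hy : y = 0 := by simpa using hz 0 (by omega)
      subst hy
      rw [List.set_cons_succ]
      have e1 : nzL ((0 : Int) :: t'.set m x) = nzL (t'.set m x) := by simp [nzL_cons]
      have e2 : nzL ((0 : Int) :: t') = nzL t' := by simp [nzL_cons]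
      rw [e1, e2]
      exact ih m (by simpa using hm)
        (fun l hl => by simpa using hz (l + 1) (by omega))
        (by simpa using h0) x

theorem nzL_take_zeros (t : List Int) :
    ∀ m, (∀ l, l < m → t.getD l 0 = 0) → nzL (t.take m) = [] := by
  intro m hz
  apply List.filter_eq_nil_iff.mpr
  intro a ha
  obtain ⟨i, hi, hget⟩ := List.getElem_of_mem ha
  have hlt : i < m := by
    have := hi
    rw [List.length_take] at this
    omega
  have hit : i < t.length := by
    have := hi
    rw [List.length_take] at this
    omega
  have : a = t.getD i 0 := by
    rw [← hget, List.getElem_take, List.getD_eq_getElem?_getD, List.getElem?_eq_getElem hit]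
    rfl
  rw [this, hz i hlt]
  simp

-- moving the last nonzero below m over the zero at m preserves the filter
theorem swapNZ (c : List Int) :
    ∀ k m, k < m → m < c.length → c.getD k 0 ≠ 0 →
    (∀ l, k < l → l < m → c.getD l 0 = 0) → c.getD m 0 = 0 →
    nzL ((c.set m (c.getD k 0)).set k 0) = nzL c := by
  induction c with
  | nil => intro k m _ hm; simp at hm
  | cons x t ih =>
    intro k m hkm hm hnz hz h0
    cases k with
    | zero =>
      have hx : x ≠ 0 := by simpa using hnz
      cases m with
      | zero => omega
      | succ m =>
        simp only [List.getD_cons_zero, List.set_cons_succ, List.set_cons_zero]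
        rw [nzL_cons, if_pos rfl, nzL_cons, if_neg hx]
        have hset := nzL_set_zeros t m (by simpa using hm)
          (fun l hl => by simpa using hz (l + 1) (by omega) (by omega))
          (by simpa using h0) x
        rw [hset]
        simp [nzL, hx]
    | succ k =>
      cases m with
      | zero => omega
      | succ m =>
        simp only [List.getD_cons_succ, List.set_cons_succ]
        rw [nzL_cons, nzL_cons]
        have := ih k m (by omega) (by simpa using hm) (by simpa using hnz)
          (fun l h1 h2 => by simpa using hz (l + 1) (by omega) (by omega))
          (by simpa using h0)
        simp only [List.getD_eq_getElem?_getD] at this ⊢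
        by_cases hx : x = 0 <;> simp [hx, this]

-- the filter of the prefix take m ends in the value at the last nonzero k
theorem nzL_take_last (c : List Int) :
    ∀ k m, k < m → m ≤ c.length → c.getD k 0 ≠ 0 →
    (∀ l, k < l → l < m → c.getD l 0 = 0) →
    nzL (c.take m) = nzL (c.take k) ++ [c.getD k 0] := by
  induction c with
  | nil => intro k m hk hm; simp at hm; omega
  | cons x t ih =>
    intro k m hkm hm hnz hz
    cases k with
    | zero =>
      have hx : x ≠ 0 := by simpa using hnz
      cases m with
      | zero => omega
      | succ m =>
        simp only [List.take_succ_cons, List.take_zero, List.getD_cons_zero]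
        rw [nzL_cons, if_neg hx]
        have htz : nzL (t.take m) = [] := nzL_take_zeros t m (fun l hl => by
          simpa using hz (l + 1) (by omega) (by omega))
        rw [htz]
        simp [nzL]
    | succ k =>
      cases m with
      | zero => omega
      | succ m =>
        simp only [List.take_succ_cons, List.getD_cons_succ]
        rw [nzL_cons, nzL_cons]
        have := ih k m (by omega) (by simpa using hm) (by simpa using hnz)
          (fun l h1 h2 => by simpa using hz (l + 1) (by omega) (by omega))
        simp only [List.getD_eq_getElem?_getD] at this ⊢
        by_cases hx : x = 0 <;> simp [hx, this]

-- the filter of the suffix, assuming the suffix is already final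
theorem S_eq (c : List Int) (m : Nat) (hd : c.drop (m + 1) = (colB c).drop (m + 1)) :
    nzL (c.drop (m + 1)) = (nzL c).drop ((m + 1) - (c.length - (nzL c).length)) := by
  rw [hd]
  unfold colB
  rw [List.drop_append, List.drop_replicate, List.length_replicate, nzL_append,
    nzL_replicate, nzL_drop_nzL]
  simp

-- position m of the packed column, when the filter splits as E ++ z :: F with F of final length
theorem colB_getElem (c : List Int) (m : Nat) (hm : m < c.length) (E F : List Int) (z : Int)
    (hsplit : nzL c = E ++ z :: F) (hF : F.length = c.length - m - 1) :
    (colB c)[m]? = some z := by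
  have hn : (nzL c).length ≤ c.length := length_nzL_le c
  rw [hsplit] at hn
  have hlen : (E ++ z :: F).length = E.length + 1 + F.length := by simp; omega
  unfold colB
  rw [hsplit]
  rw [List.getElem?_append_right (by rw [List.length_replicate]; omega)]
  rw [List.length_replicate]
  rw [List.getElem?_append_right (by omega)]
  have h0 : m - (c.length - (E ++ z :: F).length) - E.length = 0 := by omega
  rw [h0]
  rfl

theorem cStep_key (c : List Int) (m : Nat) (hm : m < c.length)
    (hd : c.drop (m + 1) = (colB c).drop (m + 1)) :
    nzL (cStep c m) = nzL c ∧ (cStep c m).length = c.length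
    ∧ (cStep c m).drop m = (colB c).drop m := by
  have hn : (nzL c).length ≤ c.length := length_nzL_le c
  have hS := S_eq c m hd
  have hSlen : (nzL (c.drop (m + 1))).length
      = (nzL c).length - ((m + 1) - (c.length - (nzL c).length)) := by
    rw [hS, List.length_drop]
  have hsplit1 : nzL c = nzL (c.take (m + 1)) ++ nzL (c.drop (m + 1)) := by
    conv_lhs => rw [← List.take_append_drop (m + 1) c]
    rw [nzL_append]
  have htake1 : c.take (m + 1) = c.take m ++ [c.getD m 0] := by
    rw [List.take_succ, List.getD_eq_getElem?_getD, List.getElem?_eq_getElem hm]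
    rfl
  have hcolBlen : (colB c).length = c.length := length_colB c
  have hdropB : (colB c).drop m = (colB c)[m]?.toList ++ (colB c).drop (m + 1) := by
    rw [List.getElem?_eq_getElem (by omega), List.drop_eq_getElem_cons (by omega : m < (colB c).length)]
    rfl
  have hdropc : c.drop m = c.getD m 0 :: c.drop (m + 1) := by
    rw [List.getD_eq_getElem?_getD, List.getElem?_eq_getElem hm, List.drop_eq_getElem_cons hm]
    rfl
  unfold cStep
  by_cases h0 : c.getD m 0 = 0
  · rw [if_pos h0]
    have hsplit2 : nzL c = nzL (c.take m) ++ nzL (c.drop (m + 1)) := by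
      rw [hsplit1, htake1, nzL_append, h0]
      simp [nzL]
    by_cases hex : ∃ l, l < m ∧ c.getD l 0 ≠ 0
    · obtain ⟨k, hk, hknz, hkz⟩ := exists_largest c m hex
      rw [cFind_some c m m k hk hknz hkz]
      have htl := nzL_take_last c k m hk (by omega) hknz hkz
      have hswap := swapNZ c k m hk hm hknz hkz h0
      have hsplit3 : nzL c = nzL (c.take k) ++ c.getD k 0 :: nzL (c.drop (m + 1)) := by
        rw [hsplit2, htl]; simp
      have hFlen : (nzL (c.drop (m + 1))).length = c.length - m - 1 := by
        have hnz3 : (nzL c).length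
            = (nzL (c.take k)).length + 1 + (nzL (c.drop (m + 1))).length := by
          rw [hsplit3]; simp; omega
        omega
      have hgm := colB_getElem c m hm (nzL (c.take k)) (nzL (c.drop (m + 1)))
        (c.getD k 0) hsplit3 hFlen
      refine ⟨hswap, by simp, ?_⟩
      have hlen2 : ((c.set m (c.getD k 0)).set k 0).length = c.length := by simp
      have hdrop1 : ((c.set m (c.getD k 0)).set k 0).drop (m + 1) = c.drop (m + 1) := by
        rw [List.drop_set, if_pos (by omega), List.drop_set, if_pos (by omega)]
      have hgetm : ((c.set m (c.getD k 0)).set k 0)[m]? = some (c.getD k 0) := by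
        rw [List.getElem?_set, if_neg (by omega), List.getElem?_set, if_pos rfl,
          if_pos (by omega)]
      rw [List.drop_eq_getElem_cons (by omega : m < ((c.set m (c.getD k 0)).set k 0).length)]
      rw [hdropB, hgm, hdrop1, ← hd]
      have : ((c.set m (c.getD k 0)).set k 0)[m] = c.getD k 0 := by
        have := hgetm
        rwa [List.getElem?_eq_getElem (by omega), Option.some.injEq] at this
      rw [this]
      rfl
    · push_neg at hex
      rw [cFind_none c m m hex]
      have hPz : nzL (c.take m) = [] := nzL_take_zeros c m hex
      have hnzS : nzL c = nzL (c.drop (m + 1)) := by rw [hsplit2, hPz]; rfl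
      have hmlt : m < c.length - (nzL c).length := by
        have := hSlen
        rw [← hnzS] at this
        omega
      have hgm : (colB c)[m]? = some 0 := by
        unfold colB
        rw [List.getElem?_append_left (by rw [List.length_replicate]; omega),
          List.getElem?_replicate, if_pos (by omega)]
      refine ⟨rfl, rfl, ?_⟩
      rw [hdropc, hdropB, hgm, ← hd, h0]
      rfl
  · rw [if_neg h0]
    have hx0 : nzL [c.getD m 0] = [c.getD m 0] := by
      rw [nzL_cons, if_neg h0]
      simp [nzL]
    have hsplit2 : nzL c = nzL (c.take m) ++ c.getD m 0 :: nzL (c.drop (m + 1)) := by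
      rw [hsplit1, htake1, nzL_append, hx0]
      simp
    have hFlen : (nzL (c.drop (m + 1))).length = c.length - m - 1 := by
      have hnz3 : (nzL c).length
          = (nzL (c.take m)).length + 1 + (nzL (c.drop (m + 1))).length := by
        rw [hsplit2]; simp; omega
      omega
    have hgm := colB_getElem c m hm (nzL (c.take m)) (nzL (c.drop (m + 1)))
      (c.getD m 0) hsplit2 hFlen
    refine ⟨rfl, rfl, ?_⟩
    rw [hdropc, hdropB, hgm, ← hd]
    rfl

theorem core (m : Nat) : ∀ (s : List Int), m ≤ s.length → s.drop m = (colB s).drop m →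
    ((List.range m).reverse).foldl cStep s = colB s := by
  induction m with
  | zero =>
    intro s _ hd
    simpa using hd
  | succ m ih =>
    intro s hm hd
    rw [rev_range_succ, List.foldl_cons]
    have hk := cStep_key s m (by omega) hd
    have hcolB : colB (cStep s m) = colB s := by
      unfold colB
      rw [hk.1, hk.2.1]
    rw [ih (cStep s m) (by rw [hk.2.1]; omega) (by rw [hcolB]; exact hk.2.2)]
    exact hcolB

theorem colA_eq (c : List Int) : ((List.range c.length).reverse).foldl cStep c = colB c := by
  apply core c.length c (le_refl _)
  have h2 : (colB c).drop c.length = [] := by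
    rw [← length_colB c]
    exact List.drop_length
  rw [List.drop_length, h2]

-- ===== VERDICT (by name: the statement is the Claim_ definition above) =====
theorem setting_spec : Claim_equal_setting := by
  unfold Claim_equal_setting
  intro arr _ hpre
  unfold Spec_setting
  by_cases harr : arr = []
  · subst harr; rfl
  · have hne : arr.isEmpty = false := by
      cases arr with
      | nil => exact absurd rfl harr
      | cons r t => rfl
    have hw : RowLen (arr.headD []).length arr := hpre
    have hA := outer_sim (arr.headD []).length ((List.range arr.length).reverse) arr
      (by intro i hi; simpa [List.mem_reverse, List.mem_range] using hi) hw rfl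
    have hB := bFold_sim (arr.headD []).length arr.length (List.range (arr.headD []).length) arr
      List.nodup_range (by intro j hj; simpa [List.mem_range] using hj) hw rfl
    unfold setting setting_alt
    rw [hne]
    simp only [Bool.false_eq_true, if_false]
    apply grid_ext
    · rw [hA.2, hB.2]
    · intro j
      rw [hA.1 j, hB.1 j]
      by_cases hj : j < (arr.headD []).length
      · rw [if_pos hj, if_pos (List.mem_range.mpr hj)]
        rw [show arr.length = (colOf arr j).length from (length_colOf arr j).symm]
        exact colA_eq (colOf arr j)
      · rw [if_neg hj, if_neg (fun h => hj (List.mem_range.mp h))]
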